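-- pv_equiv track=rewrite | github.com/benjamin091/multi-agent-pathfinding-tabu-a-star | src/Tabusearch.py | evaluierung
-- ===== SOURCE A (Python) =====
-- def evaluierung(liste_agents, lambda_collision = 100):
--     total_length = 0
--     collision_count = 0
--     collision_swap_count = 0
--     lambda_collision = 100
--
--     for index, value in enumerate(liste_agents):
--         total_length += len(value)
--
--     #Liste nach Länge der Dict. sortieren
--     liste_agents.sort(key = len, reverse=True)
--     len_liste_agents = len(liste_agents)
--     liste_agents_work = liste_agents
--
--
--     for index_i, value_i in enumerate(liste_agents_work[1]):
--         element_min = liste_agents_work[-1]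
--
--         if index_i > len(element_min)-1:
--             liste_agents_work.pop()
--
--         for index_j in range(len(liste_agents_work)):
--
--             for index_k in range(index_j+1, len(liste_agents_work)):
--                 if index_i > 0:
--                     if liste_agents[index_j][index_i] == liste_agents[index_k][index_i]:
--                         collision_count+=1
--
--                     elif (liste_agents[index_j][index_i] == liste_agents[index_k][index_i-1] and liste_agents[index_j][index_i-1] == liste_agents[index_k][index_i]):
--                         collision_swap_count+=1
--
--     return total_length + lambda_collision * (collision_count+collision_swap_count)
-- ===== SOURCE B (Python) =====
-- def evaluierung(liste_agents, lambda_collision=100):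
--     # NOTE: the original deliberately overrides the parameter with 100; we keep that behaviour.
--     lambda_collision = 100
--     total_length = sum(len(p) for p in liste_agents)
--     # the original iterates over the second-longest path's timesteps
--     second_longest = sorted((len(p) for p in liste_agents), reverse=True)[1]
--     collision_count = 0
--     collision_swap_count = 0
--     for i in range(1, second_longest):
--         cells = {}   # cell at time i -> how many active agents are there
--         edges = {}   # (cell at i-1, cell at i) -> how many active agents moved along it
--         for p in liste_agents:
--             if len(p) > i:
--                 c = p[i]
--                 e = (p[i - 1], c)
--                 collision_count += cells.get(c, 0)
--                 if e[0] != e[1]: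
--                     collision_swap_count += edges.get((e[1], e[0]), 0)
--                 cells[c] = cells.get(c, 0) + 1
--                 edges[e] = edges.get(e, 0) + 1
--     return total_length + lambda_collision * (collision_count + collision_swap_count)
-- ===== Notes on version B (the rewrite author's own statement) =====
-- stated objective: faster
-- what changed: Instead of sorting, destructively popping exhausted paths and scanning all agent pairs at every timestep, B makes one pass per timestep over the still-active agents, grouping them in dictionaries keyed by current cell and by (previous cell, current cell) edge, so same-cell pairs and reversed-edge swap pairs are counted by O(1) lookups with no pairwise scan (and B does not mutate the input list).
import Mathlib
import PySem

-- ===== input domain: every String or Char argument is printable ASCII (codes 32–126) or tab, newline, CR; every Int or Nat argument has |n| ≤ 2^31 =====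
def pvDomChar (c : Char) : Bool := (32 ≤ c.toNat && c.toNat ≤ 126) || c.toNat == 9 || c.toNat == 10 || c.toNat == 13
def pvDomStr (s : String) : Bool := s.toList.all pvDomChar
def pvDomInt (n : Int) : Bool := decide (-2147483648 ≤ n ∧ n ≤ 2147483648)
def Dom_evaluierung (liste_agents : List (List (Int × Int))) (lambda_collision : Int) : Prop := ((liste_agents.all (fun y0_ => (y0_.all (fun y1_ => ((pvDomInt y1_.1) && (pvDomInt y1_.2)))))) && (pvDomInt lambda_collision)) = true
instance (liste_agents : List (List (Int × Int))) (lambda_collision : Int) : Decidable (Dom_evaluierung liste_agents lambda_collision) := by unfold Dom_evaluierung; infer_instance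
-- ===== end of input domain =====

-- B replaces A's sort-pop-and-scan-all-pairs evaluation by one dictionary-grouping pass per
-- timestep (objective: faster). A also sorts and pops the caller's list in place; the
-- equivalence proved here is about the RETURN value only (B does not mutate its argument).

-- ===== PORT A =====
-- liste_agents[j][i] (both indexings may raise IndexError; none is modelled by the getD-chain,
-- and Pre_ excludes every input on which the Python raises)
def pvGet2 (xs : List (List (Int × Int))) (j i : Int) : Option (Int × Int) :=
  PySem.List.pyGet? ((PySem.List.pyGet? xs j).getD []) i

-- the two nested index loops over the agent pairs (collision / swap counting)
def pvPhase (index_i : Int) (work : List (List (Int × Int))) (cs : Int × Int) : Int × Int :=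
  (PySem.List.pyRange 0 (work.length : Int)).foldl
    (fun cs index_j =>
      (PySem.List.pyRange (index_j + 1) (work.length : Int)).foldl
        (fun cs index_k =>
          if index_i > 0 then
            if pvGet2 work index_j index_i = pvGet2 work index_k index_i then
              (cs.1 + 1, cs.2)
            else if pvGet2 work index_j index_i = pvGet2 work index_k (index_i - 1) ∧
                    pvGet2 work index_j (index_i - 1) = pvGet2 work index_k index_i then
              (cs.1, cs.2 + 1)
            else cs
          else cs)
        cs)
    cs

-- one iteration of the main 'for index_i, value_i in enumerate(...)' loop
def pvStepA (st : List (List (Int × Int)) × Int × Int) (iv : Int × (Int × Int)) :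
    List (List (Int × Int)) × Int × Int :=
  let index_i := iv.1
  let work := st.1
  let element_min := (PySem.List.pyGet? work (-1)).getD []
  let work :=
    if index_i > (element_min.length : Int) - 1 then
      match PySem.List.pop? work with
      | some r => r.2
      | none => work
    else work
  (work, pvPhase index_i work (st.2.1, st.2.2))

def evaluierung (liste_agents : List (List (Int × Int))) (lambda_collision : Int) : Int :=
  let total_length : Int := liste_agents.foldl (fun acc value => acc + (value.length : Int)) 0
  let lam : Int := 100
  -- liste_agents.sort(key=len, reverse=True); liste_agents_work aliases the same list
  let sortedW : List (List (Int × Int)) := PySem.List.sorted liste_agents (fun l => (l.length : Int)) true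
  let second : List (Int × Int) := (PySem.List.pyGet? sortedW 1).getD []
  let fin : List (List (Int × Int)) × Int × Int :=
    (PySem.List.enumerate second).foldl pvStepA (sortedW, 0, 0)
  total_length + lam * (fin.2.1 + fin.2.2)

-- ===== PORT B =====
-- the per-agent body of B's per-timestep pass (dict grouping by cell and by edge)
def pvStepB (i : Int)
    (st : PySem.Dict (Int × Int) Int × PySem.Dict ((Int × Int) × (Int × Int)) Int × Int × Int)
    (p : List (Int × Int)) :
    PySem.Dict (Int × Int) Int × PySem.Dict ((Int × Int) × (Int × Int)) Int × Int × Int :=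
  if i < (p.length : Int) then
    let c := (PySem.List.pyGet? p i).getD (0, 0)
    let e : (Int × Int) × (Int × Int) := ((PySem.List.pyGet? p (i - 1)).getD (0, 0), c)
    let cells := st.1
    let edges := st.2.1
    let coll := st.2.2.1 + cells.getD c 0
    let swap := if e.1 ≠ e.2 then st.2.2.2 + edges.getD (e.2, e.1) 0 else st.2.2.2
    (cells.insert c (cells.getD c 0 + 1), edges.insert e (edges.getD e 0 + 1), coll, swap)
  else st

def evaluierung_alt (liste_agents : List (List (Int × Int))) (lambda_collision : Int) : Int :=
  let lam : Int := 100
  let total_length : Int := liste_agents.foldl (fun acc p => acc + (p.length : Int)) 0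
  let second_longest : Int :=
    (PySem.List.pyGet?
      (PySem.List.sorted (liste_agents.map (fun p => (p.length : Int))) (fun x => x) true) 1).getD 0
  let res : Int × Int :=
    (PySem.List.pyRange 1 second_longest).foldl
      (fun acc i =>
        let r := liste_agents.foldl (pvStepB i) (PySem.Dict.empty, PySem.Dict.empty, acc.1, acc.2)
        (r.2.2.1, r.2.2.2))
      (0, 0)
  total_length + lam * (res.1 + res.2)

-- ===== PRECONDITION & SPEC =====
def pvCntLE (l : List (List (Int × Int))) (t : Nat) : Nat := l.countP (fun p => decide (p.length ≤ t))
def pvCntGT (l : List (List (Int × Int))) (t : Nat) : Nat := l.countP (fun p => decide (t < p.length))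
def pvMaxLen (l : List (List (Int × Int))) : Nat := l.foldl (fun m p => max m p.length) 0

-- Pre_ is exactly where the Python A returns normally: at least two paths, and below the
-- second-longest length the shorter paths must run out at most one per timestep (A pops only
-- one exhausted path per timestep; any faster pile-up makes A's pairwise scan index an
-- exhausted path and raise IndexError).
def Pre_evaluierung (liste_agents : List (List (Int × Int))) (lambda_collision : Int) : Prop :=
  2 ≤ liste_agents.length ∧
  ∀ i : Nat, i < pvMaxLen liste_agents → 1 ≤ i → 2 ≤ pvCntGT liste_agents i →
    pvCntLE liste_agents i ≤ i + 1 ∧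
    ∀ j : Nat, j < i → pvCntLE liste_agents i ≤ pvCntLE liste_agents j + (i - j)

instance (liste_agents : List (List (Int × Int))) (lambda_collision : Int) : Decidable (Pre_evaluierung liste_agents lambda_collision) := by
  unfold Pre_evaluierung; infer_instance

def pvWitness_evaluierung : (List (List (Int × Int))) × Int :=
  ([[(0, 0), (0, 1), (0, 2)], [(1, 1), (0, 1), (1, 2)]], 100)

def Spec_evaluierung (liste_agents : List (List (Int × Int))) (lambda_collision : Int) (out : Int) : Prop := out = evaluierung_alt liste_agents lambda_collision
instance (liste_agents : List (List (Int × Int))) (lambda_collision : Int) (out : Int) : Decidable (Spec_evaluierung liste_agents lambda_collision out) := by unfold Spec_evaluierung; infer_instance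

-- ===== CLAIM (what is proved, stated in full; the proofs are below) =====
def Claim_equal_evaluierung : Prop := ∀ (liste_agents : List (List (Int × Int))) (lambda_collision : Int), Dom_evaluierung liste_agents lambda_collision → Pre_evaluierung liste_agents lambda_collision → Spec_evaluierung liste_agents lambda_collision (evaluierung liste_agents lambda_collision)

-- ===== LEMMAS AND PROOFS =====

-- the number of pops A has performed on entry to timestep i
def pvPop (l : List (List (Int × Int))) : Nat → Nat
  | 0 => 0
  | i + 1 => if pvPop l i < pvCntLE l i then pvPop l i + 1 else pvPop l i

-- unordered-pair count: pairs (x earlier, y later) of l with R x y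
def pvPairs {α : Type} (R : α → α → Bool) : List α → Int
  | [] => 0
  | x :: xs => (xs.countP (R x) : Int) + pvPairs R xs

-- edge travelled at timestep i (value level), and the two pair relations
def pvEdge (i : Int) (p : List (Int × Int)) : (Int × Int) × (Int × Int) :=
  ((PySem.List.pyGet? p (i - 1)).getD (0, 0), (PySem.List.pyGet? p i).getD (0, 0))

def pvRc : (Int × Int) × (Int × Int) → (Int × Int) × (Int × Int) → Bool :=
  fun e f => decide (e.2 = f.2)
def pvRs : (Int × Int) × (Int × Int) → (Int × Int) × (Int × Int) → Bool :=
  fun e f => decide (f = (e.2, e.1) ∧ e.1 ≠ e.2)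

def pvAct (l : List (List (Int × Int))) (i : Int) : List (List (Int × Int)) :=
  l.filter (fun p => decide (i < (p.length : Int)))

def pvCC (l : List (List (Int × Int))) (i : Int) : Int := pvPairs pvRc ((pvAct l i).map (pvEdge i))
def pvSS (l : List (List (Int × Int))) (i : Int) : Int := pvPairs pvRs ((pvAct l i).map (pvEdge i))

theorem pvPairs_congr {α : Type} {R S : α → α → Bool} : ∀ {l : List α},
    (∀ x ∈ l, ∀ y ∈ l, R x y = S x y) → pvPairs R l = pvPairs S l := by
  intro l
  induction l with
  | nil => intro _; rfl
  | cons x xs ih =>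
    intro h
    simp only [pvPairs]
    rw [List.countP_congr (fun y hy => by
          rw [h x (by simp) y (by simp [hy])]),
        ih (fun a ha b hb => h a (by simp [ha]) b (by simp [hb]))]

theorem pvPairs_map {α β : Type} (f : α → β) (S : β → β → Bool) : ∀ (l : List α),
    pvPairs (fun x y => S (f x) (f y)) l = pvPairs S (l.map f) := by
  intro l
  induction l with
  | nil => rfl
  | cons x xs ih =>
    simp only [pvPairs, List.map_cons, List.countP_map, ih]
    rfl

theorem pvPairs_perm {α : Type} (R : α → α → Bool) (hsym : ∀ x y, R x y = R y x)
    {l l' : List α} (h : l.Perm l') : pvPairs R l = pvPairs R l' := by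
  induction h with
  | nil => rfl
  | cons x h ih => simp only [pvPairs, ih, h.countP_eq]
  | swap x y l =>
    simp only [pvPairs, List.countP_cons]
    rw [hsym y x]
    omega
  | trans h1 h2 ih1 ih2 => omega

theorem pvRc_symm (e f : (Int × Int) × (Int × Int)) : pvRc e f = pvRc f e := by
  simp only [pvRc, decide_eq_decide]; exact eq_comm

theorem pvRs_symm (e f : (Int × Int) × (Int × Int)) : pvRs e f = pvRs f e := by
  simp only [pvRs, decide_eq_decide]
  constructor
  · rintro ⟨rfl, h⟩; exact ⟨rfl, fun hh => h hh.symm⟩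
  · rintro ⟨rfl, h⟩; exact ⟨rfl, fun hh => h hh.symm⟩

-- ---------- B side ----------

-- the then-branch of pvStepB (what happens to a still-active agent)
def pvUpd (i : Int)
    (st : PySem.Dict (Int × Int) Int × PySem.Dict ((Int × Int) × (Int × Int)) Int × Int × Int)
    (p : List (Int × Int)) :
    PySem.Dict (Int × Int) Int × PySem.Dict ((Int × Int) × (Int × Int)) Int × Int × Int :=
  let c := (PySem.List.pyGet? p i).getD (0, 0)
  let e : (Int × Int) × (Int × Int) := ((PySem.List.pyGet? p (i - 1)).getD (0, 0), c)
  let cells := st.1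
  let edges := st.2.1
  let coll := st.2.2.1 + cells.getD c 0
  let swap := if e.1 ≠ e.2 then st.2.2.2 + edges.getD (e.2, e.1) 0 else st.2.2.2
  (cells.insert c (cells.getD c 0 + 1), edges.insert e (edges.getD e 0 + 1), coll, swap)

def pvCrossC (seen es : List ((Int × Int) × (Int × Int))) : Int :=
  (es.map (fun f => (((seen.map Prod.snd).count f.2 : Nat) : Int))).sum
def pvCrossS (seen es : List ((Int × Int) × (Int × Int))) : Int :=
  (es.map (fun f => if f.1 ≠ f.2 then ((seen.count (f.2, f.1) : Nat) : Int) else 0)).sum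

theorem pvCrossC_append (seen e es) :
    pvCrossC (seen ++ [e]) es = pvCrossC seen es + (es.countP (pvRc e) : Int) := by
  unfold pvCrossC
  have point : ∀ f : (Int × Int) × (Int × Int),
      ((((seen ++ [e]).map Prod.snd).count f.2 : Nat) : Int)
        = (((seen.map Prod.snd).count f.2 : Nat) : Int) + (if pvRc e f then (1 : Int) else 0) := by
    intro f
    rw [List.map_append]
    by_cases h : f.2 = e.2
    · simp [List.count_append, pvRc, h]
    · have h' : ¬ e.2 = f.2 := fun hh => h hh.symm
      simp [List.count_append, pvRc, h']
  rw [List.map_congr_left (fun f _ => point f), PySem.List.sum_map_add_int,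
      PySem.List.sum_map_ite_one_zero (p := pvRc e)]

theorem pvCrossS_append (seen e es) :
    pvCrossS (seen ++ [e]) es = pvCrossS seen es + (es.countP (pvRs e) : Int) := by
  unfold pvCrossS
  have point : ∀ f : (Int × Int) × (Int × Int),
      (if f.1 ≠ f.2 then (((seen ++ [e]).count (f.2, f.1) : Nat) : Int) else 0)
        = (if f.1 ≠ f.2 then ((seen.count (f.2, f.1) : Nat) : Int) else 0)
          + (if pvRs e f then (1 : Int) else 0) := by
    intro f
    by_cases h1 : f.1 = f.2
    · have hrs : pvRs e f = false := by
        simp only [pvRs, decide_eq_false_iff_not]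
        rintro ⟨rfl, hne⟩
        exact hne h1.symm
      simp [h1, hrs]
    · by_cases h2 : e = (f.2, f.1)
      · have hrs : pvRs e f = true := by
          subst h2
          simp only [pvRs, decide_eq_true_eq]
          exact ⟨trivial, fun hh => h1 hh.symm⟩
        simp [h1, hrs, List.count_append, List.count_cons]
        omega
      · have hrs : pvRs e f = false := by
          simp only [pvRs, decide_eq_false_iff_not]
          rintro ⟨rfl, hne⟩; exact h2 rfl
        have h2' : (f.2, f.1) ≠ e := fun hh => h2 hh.symm
        simp [h1, hrs, List.count_append, h2]
  rw [List.map_congr_left (fun f _ => point f), PySem.List.sum_map_add_int,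
      PySem.List.sum_map_ite_one_zero (p := pvRs e)]


theorem pvBstream (i : Int) : ∀ (l : List (List (Int × Int)))
    (cells : PySem.Dict (Int × Int) Int)
    (edges : PySem.Dict ((Int × Int) × (Int × Int)) Int)
    (seen : List ((Int × Int) × (Int × Int))) (coll swap : Int),
    (∀ v, cells.getD v 0 = ((seen.map Prod.snd).count v : Int)) →
    (∀ f, edges.getD f 0 = (seen.count f : Int)) →
    (l.foldl (pvUpd i) (cells, edges, coll, swap)).2.2
      = (coll + pvCrossC seen (l.map (pvEdge i)) + pvPairs pvRc (l.map (pvEdge i)),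
         swap + pvCrossS seen (l.map (pvEdge i)) + pvPairs pvRs (l.map (pvEdge i))) := by
  intro l
  induction l with
  | nil =>
    intro cells edges seen coll swap hc he
    simp [pvCrossC, pvCrossS, pvPairs]
  | cons p t ih =>
    intro cells edges seen coll swap hc he
    have hE : pvEdge i p = ((PySem.List.pyGet? p (i - 1)).getD (0, 0), (PySem.List.pyGet? p i).getD (0, 0)) := rfl
    have hupd : pvUpd i (cells, edges, coll, swap) p
        = (cells.insert (pvEdge i p).2 (cells.getD (pvEdge i p).2 0 + 1),
           edges.insert (pvEdge i p) (edges.getD (pvEdge i p) 0 + 1),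
           coll + cells.getD (pvEdge i p).2 0,
           if (pvEdge i p).1 ≠ (pvEdge i p).2 then
             swap + edges.getD ((pvEdge i p).2, (pvEdge i p).1) 0
           else swap) := rfl
    rw [List.foldl_cons, hupd]
    rw [ih _ _ (seen ++ [pvEdge i p]) _ _
          (fun v => by
            rw [PySem.Dict.getD_insert]
            by_cases hv : v = (pvEdge i p).2
            · simp [hv, hc, List.count_append, List.count_cons]
            · have hv' : ¬ (pvEdge i p).2 = v := fun hh => hv hh.symm
              simp [hv, hc, List.count_append, List.count_cons, hv'])
          (fun f => by
            rw [PySem.Dict.getD_insert]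
            by_cases hf : f = pvEdge i p
            · simp [hf, he, List.count_append, List.count_cons]
            · have hf' : ¬ pvEdge i p = f := fun hh => hf hh.symm
              simp [hf, he, List.count_append, List.count_cons, hf'])]
    have hcC : cells.getD (pvEdge i p).2 0 = (((seen.map Prod.snd).count (pvEdge i p).2 : Nat) : Int) := hc _
    have hswap : (if (pvEdge i p).1 ≠ (pvEdge i p).2 then
            swap + edges.getD ((pvEdge i p).2, (pvEdge i p).1) 0
          else swap)
        = swap + (if (pvEdge i p).1 ≠ (pvEdge i p).2 then
            ((seen.count ((pvEdge i p).2, (pvEdge i p).1) : Nat) : Int) else 0) := by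
      by_cases hg : (pvEdge i p).1 ≠ (pvEdge i p).2 <;> simp [hg, he]
    rw [hswap]
    have hcrossC : pvCrossC seen (pvEdge i p :: t.map (pvEdge i))
        = (((seen.map Prod.snd).count (pvEdge i p).2 : Nat) : Int) + pvCrossC seen (t.map (pvEdge i)) := by
      simp [pvCrossC]
    have hcrossS : pvCrossS seen (pvEdge i p :: t.map (pvEdge i))
        = (if (pvEdge i p).1 ≠ (pvEdge i p).2 then
            ((seen.count ((pvEdge i p).2, (pvEdge i p).1) : Nat) : Int) else 0)
          + pvCrossS seen (t.map (pvEdge i)) := by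
      simp [pvCrossS]
    simp only [List.map_cons, pvPairs, hcrossC, hcrossS,
      pvCrossC_append, pvCrossS_append, Prod.mk.injEq]
    constructor <;> omega

theorem pvCrossC_nil (es) : pvCrossC [] es = 0 := by
  simp [pvCrossC]
theorem pvCrossS_nil (es) : pvCrossS [] es = 0 := by
  have : ∀ f : (Int × Int) × (Int × Int),
      (if f.1 ≠ f.2 then ((List.count (f.2, f.1) ([] : List ((Int × Int) × (Int × Int))) : Nat) : Int) else 0) = 0 := by
    intro f; by_cases h : f.1 ≠ f.2 <;> simp [h]
  simp [pvCrossS]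

theorem pvStepB_foldl (i : Int) (l : List (List (Int × Int))) (st) :
    l.foldl (pvStepB i) st = (pvAct l i).foldl (pvUpd i) st := by
  have : l.foldl (pvStepB i) st
      = l.foldl (fun st p => if i < (p.length : Int) then pvUpd i st p else st) st := by
    rfl
  rw [this, PySem.List.foldl_ite_eq_foldl_filter (p := fun p : List (Int × Int) => i < (p.length : Int)) (f := pvUpd i)]
  rfl

-- B's value, reduced to the canonical per-timestep counts
theorem pvB_eq (l : List (List (Int × Int))) (lam : Int) :
    evaluierung_alt l lam
      = l.foldl (fun acc p => acc + (p.length : Int)) 0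
        + 100 * (((PySem.List.pyRange 1 ((PySem.List.pyGet?
              (PySem.List.sorted (l.map (fun p => (p.length : Int))) (fun x => x) true) 1).getD 0)).map
                (fun i => pvCC l i)).sum
          + ((PySem.List.pyRange 1 ((PySem.List.pyGet?
              (PySem.List.sorted (l.map (fun p => (p.length : Int))) (fun x => x) true) 1).getD 0)).map
                (fun i => pvSS l i)).sum) := by
  unfold evaluierung_alt
  dsimp only
  have hbody : ∀ (acc : Int × Int) (i : Int),
      (fun (acc : Int × Int) (i : Int) =>
        let r := l.foldl (pvStepB i) (PySem.Dict.empty, PySem.Dict.empty, acc.1, acc.2)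
        (r.2.2.1, r.2.2.2)) acc i
      = (acc.1 + pvCC l i, acc.2 + pvSS l i) := by
    intro acc i
    show ((l.foldl (pvStepB i) (PySem.Dict.empty, PySem.Dict.empty, acc.1, acc.2)).2.2.1,
          (l.foldl (pvStepB i) (PySem.Dict.empty, PySem.Dict.empty, acc.1, acc.2)).2.2.2)
        = (acc.1 + pvCC l i, acc.2 + pvSS l i)
    rw [pvStepB_foldl]
    have hres := pvBstream i (pvAct l i) PySem.Dict.empty PySem.Dict.empty [] acc.1 acc.2
      (fun v => by simp [PySem.Dict.getD_empty]) (fun f => by simp [PySem.Dict.getD_empty])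
    have h1 : (((pvAct l i).foldl (pvUpd i) (PySem.Dict.empty, PySem.Dict.empty, acc.1, acc.2)).2.2).1
        = acc.1 + pvCC l i := by
      rw [hres]; simp [pvCrossC_nil, pvCC]
    have h2 : (((pvAct l i).foldl (pvUpd i) (PySem.Dict.empty, PySem.Dict.empty, acc.1, acc.2)).2.2).2
        = acc.2 + pvSS l i := by
      rw [hres]; simp [pvCrossS_nil, pvSS]
    rw [Prod.mk.injEq]
    exact ⟨h1, h2⟩
  rw [PySem.List.foldl_congr_mem _ _
        (fun acc i => (acc.1 + pvCC l i, acc.2 + pvSS l i)) _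
        (fun acc i _ => hbody acc i)]
  rw [PySem.List.foldl_prod_mk (f := fun a i => a + pvCC l i) (g := fun a i => a + pvSS l i)]
  rw [PySem.List.foldl_add, PySem.List.foldl_add]
  simp
  rw [PySem.List.foldl_add]
  simp

-- ---------- A side ----------

theorem pvDesc_count {L : List (List (Int × Int))}
    (hd : L.Pairwise (fun a b => b.length ≤ a.length)) (k : Nat) (hk : k < L.length) (i : Nat) :
    i < L[k].length ↔ k + 1 ≤ L.countP (fun p => decide (i < p.length)) := by
  have hd' := List.pairwise_iff_getElem.mp hd
  constructor
  · intro h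
    have htake : (L.take (k + 1)).countP (fun p => decide (i < p.length)) = k + 1 := by
      rw [List.countP_eq_length.mpr, List.length_take]
      · omega
      · intro x hx
        simp only [decide_eq_true_eq]
        obtain ⟨a, ha, hax⟩ := List.mem_iff_getElem.mp hx
        have hak1 : a < k + 1 := by
          have := ha; rw [List.length_take] at this; omega
        have haL : a < L.length := by omega
        have hxa : x = L[a]'haL := by
          rw [← hax]; exact List.getElem_take
        rcases Nat.lt_or_ge a k with hak | hak
        · have hle := hd' a k haL hk hak
          rw [hxa]; omega
        · have : a = k := by omega
          subst this
          rw [hxa]; exact h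
    have hsplit := List.countP_append (l₁ := L.take (k + 1)) (l₂ := L.drop (k + 1))
      (p := fun p => decide (i < p.length))
    rw [List.take_append_drop] at hsplit
    omega
  · intro h
    by_contra hcon
    push_neg at hcon
    have hdrop : (L.drop k).countP (fun p => decide (i < p.length)) = 0 := by
      rw [List.countP_eq_zero]
      intro x hx
      simp only [decide_eq_true_eq, Nat.not_lt]
      obtain ⟨a, ha, hax⟩ := List.mem_iff_getElem.mp hx
      have hka : k + a < L.length := by
        have := ha; rw [List.length_drop] at this; omega
      have hxa : x = L[k + a]'hka := by
        rw [← hax]; exact List.getElem_drop ..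
      rcases Nat.eq_zero_or_pos a with rfl | hpos
      · rw [hxa]; simpa using hcon
      · have hle := hd' k (k + a) hk hka (by omega)
        rw [hxa]; omega
    have hsplit := List.countP_append (l₁ := L.take k) (l₂ := L.drop k)
      (p := fun p => decide (i < p.length))
    rw [List.take_append_drop] at hsplit
    have hlen := List.countP_le_length (p := fun p => decide (i < p.length)) (l := L.take k)
    rw [List.length_take] at hlen
    omega

theorem pvDesc_filter_eq_take : ∀ {L : List (List (Int × Int))},
    L.Pairwise (fun a b => b.length ≤ a.length) → ∀ (i : Nat),
    L.filter (fun p => decide (i < p.length))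
      = L.take (L.countP (fun p => decide (i < p.length))) := by
  intro L
  induction L with
  | nil => intro _ i; rfl
  | cons p t ih =>
    intro hd i
    have hpt : ∀ q ∈ t, q.length ≤ p.length := fun q hq => (List.pairwise_cons.mp hd).1 q hq
    have hdt : t.Pairwise (fun a b => b.length ≤ a.length) := (List.pairwise_cons.mp hd).2
    by_cases h : i < p.length
    · simp [List.filter_cons, List.countP_cons, h, List.take_succ_cons, ih hdt i]
    · have hnone : ∀ q ∈ t, ¬ (i < q.length) := fun q hq => by
        have := hpt q hq; omega
      have h1 : (p :: t).filter (fun p => decide (i < p.length)) = [] := by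
        rw [List.filter_eq_nil_iff]
        intro q hq
        rcases List.mem_cons.mp hq with rfl | hq'
        · simpa using h
        · simpa using hnone q hq'
      have h2 : (p :: t).countP (fun p => decide (i < p.length)) = 0 := by
        rw [List.countP_eq_zero]
        intro q hq
        rcases List.mem_cons.mp hq with rfl | hq'
        · simpa using h
        · simpa using hnone q hq'
      rw [h1, h2, List.take_zero]

theorem pvPop_le_cle (l : List (List (Int × Int))) : ∀ (i : Nat), pvPop l (i + 1) ≤ pvCntLE l i := by
  intro i
  induction i with
  | zero =>
    have hstep : pvPop l 1 = if pvPop l 0 < pvCntLE l 0 then pvPop l 0 + 1 else pvPop l 0 := rfl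
    have h0 : pvPop l 0 = 0 := rfl
    rw [hstep]; split_ifs <;> omega
  | succ j ih =>
    have hmono : pvCntLE l j ≤ pvCntLE l (j + 1) := by
      apply List.countP_mono_left
      intro x hx
      simp only [decide_eq_true_eq]
      omega
    have hstep : pvPop l (j + 1 + 1)
        = if pvPop l (j + 1) < pvCntLE l (j + 1) then pvPop l (j + 1) + 1 else pvPop l (j + 1) := rfl
    rw [hstep]; split_ifs <;> omega

theorem pvPop_lb (l : List (List (Int × Int))) : ∀ (i : Nat),
    i ≤ pvPop l i ∨ ∃ j, j < i ∧ pvCntLE l j + (i - 1 - j) ≤ pvPop l i := by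
  intro i
  induction i with
  | zero => left; omega
  | succ i ih =>
    by_cases h : pvPop l i < pvCntLE l i
    · have hstep : pvPop l (i + 1) = pvPop l i + 1 := by simp only [pvPop]; rw [if_pos h]
      rcases ih with hl | ⟨j, hj, hle⟩
      · left; omega
      · right; exact ⟨j, by omega, by omega⟩
    · have hstep : pvPop l (i + 1) = pvPop l i := by simp only [pvPop]; rw [if_neg h]
      right
      exact ⟨i, by omega, by omega⟩

-- under Pre_, at every timestep 1 ≤ i below the second-longest length, exactly the
-- exhausted paths have been popped
theorem pvPop_safety (l : List (List (Int × Int))) (lam : Int)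
    (hpre : Pre_evaluierung l lam) (i : Nat) (h1 : 1 ≤ i)
    (hmax : i < pvMaxLen l) (hcnt : 2 ≤ pvCntGT l i) :
    pvPop l (i + 1) = pvCntLE l i := by
  obtain ⟨hn, hall⟩ := hpre
  obtain ⟨hb1, hb2⟩ := hall i hmax h1 hcnt
  have hle := pvPop_le_cle l i
  rcases pvPop_lb l (i + 1) with hl | ⟨j, hj, hjle⟩
  · omega
  · rcases Nat.lt_or_ge j i with hji | hji
    · have := hb2 j hji
      omega
    · have hj' : j = i := by omega
      subst hj'
      omega

theorem pvPairLoopAux {α : Type} (R S : α → α → Bool) (d : α) :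
    ∀ (w : List α) (cs : Int × Int),
    (PySem.List.pyRange 0 (w.length : Int)).foldl
      (fun cs j => (w.drop (j + 1).toNat).foldl
        (fun cs q => ((if R (PySem.List.pyGetD w j d) q then cs.1 + 1 else cs.1),
                      (if S (PySem.List.pyGetD w j d) q then cs.2 + 1 else cs.2))) cs) cs
    = (cs.1 + pvPairs R w, cs.2 + pvPairs S w) := by
  intro w
  induction w with
  | nil =>
    intro cs
    rw [PySem.List.pyRange_one_eq_nil (by simp)]
    simp [pvPairs]
  | cons x t ih =>
    intro cs
    have hlen : ((x :: t).length : Int) = (t.length : Int) + 1 := by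
      simp
    rw [PySem.List.pyRange_one_cons (by simp)]
    rw [List.foldl_cons]
    -- the j = 0 contribution
    have h0get : PySem.List.pyGetD (x :: t) 0 d = x := by
      simp [pysem]
    have h0drop : (x :: t).drop ((0 : Int) + 1).toNat = t := rfl
    rw [h0get, h0drop]
    rw [PySem.List.foldl_prod_mk (f := fun a q => if R x q then a + 1 else a)
          (g := fun a q => if S x q then a + 1 else a)]
    rw [PySem.List.foldl_if_add_one, PySem.List.foldl_if_add_one]
    -- the remaining outer loop: shift indices down by one
    have hshift : (PySem.List.pyRange (0 + 1) ((x :: t).length : Int)).foldl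
        (fun cs j => ((x :: t).drop (j + 1).toNat).foldl
          (fun cs q => ((if R (PySem.List.pyGetD (x :: t) j d) q then cs.1 + 1 else cs.1),
                        (if S (PySem.List.pyGetD (x :: t) j d) q then cs.2 + 1 else cs.2))) cs)
          (cs.1 + (t.countP (R x) : Int), cs.2 + (t.countP (S x) : Int))
        = (PySem.List.pyRange 0 (t.length : Int)).foldl
        (fun cs j => (t.drop (j + 1).toNat).foldl
          (fun cs q => ((if R (PySem.List.pyGetD t j d) q then cs.1 + 1 else cs.1),
                        (if S (PySem.List.pyGetD t j d) q then cs.2 + 1 else cs.2))) cs)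
          (cs.1 + (t.countP (R x) : Int), cs.2 + (t.countP (S x) : Int)) := by
      rw [hlen, zero_add]
      rw [PySem.List.pyRange_one 1 ((t.length : Int) + 1), PySem.List.pyRange_one 0 (t.length : Int)]
      have harg : ((t.length : Int) + 1 - 1).toNat = ((t.length : Int) - 0).toNat := by omega
      rw [harg]
      rw [List.foldl_map, List.foldl_map]
      apply PySem.List.foldl_congr_mem
      intro acc k hk
      have hkt : k < t.length := by
        have := List.mem_range.mp hk; omega
      have h1 : (1 + (k : Int)) = ((k + 1 : Nat) : Int) := by push_cast; ring
      have h2 : (0 + (k : Int)) = ((k : Nat) : Int) := by push_cast; ring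
      rw [h1, h2]
      rw [PySem.List.pyGetD_natCast, PySem.List.pyGetD_natCast]
      have h3 : (((k + 1 : Nat) : Int) + 1).toNat = k + 2 := by omega
      have h4 : (((k : Nat) : Int) + 1).toNat = k + 1 := by omega
      rw [h3, h4]
      have h5 : (x :: t).drop (k + 2) = t.drop (k + 1) := rfl
      have h6 : (x :: t).getD (k + 1) d = t.getD k d := rfl
      rw [h5, h6]
    rw [hshift, ih]
    simp only [pvPairs]
    rw [Prod.mk.injEq]
    exact ⟨by omega, by omega⟩



def pvRA (i : Int) (p q : List (Int × Int)) : Bool :=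
  decide (PySem.List.pyGet? p i = PySem.List.pyGet? q i)
def pvRS (i : Int) (p q : List (Int × Int)) : Bool :=
  decide (¬ (PySem.List.pyGet? p i = PySem.List.pyGet? q i) ∧
    PySem.List.pyGet? p i = PySem.List.pyGet? q (i - 1) ∧
    PySem.List.pyGet? p (i - 1) = PySem.List.pyGet? q i)

theorem pvGetD_getD (xs : List (List (Int × Int))) (j : Int) :
    PySem.List.pyGetD xs j [] = (PySem.List.pyGet? xs j).getD [] := by
  simp [PySem.List.pyGetD, PySem.List.pyGet?]

theorem pvPhase_eq (i : Int) (hi : 0 < i) (w : List (List (Int × Int))) (cs : Int × Int) :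
    pvPhase i w cs = (cs.1 + pvPairs (pvRA i) w, cs.2 + pvPairs (pvRS i) w) := by
  unfold pvPhase
  simp only [pvGet2, ← pvGetD_getD]
  rw [PySem.List.foldl_congr_mem _ _
        (fun cs j => (PySem.List.pyRange (j + 1) (w.length : Int)).foldl
          (fun cs k =>
            ((if pvRA i (PySem.List.pyGetD w j []) (PySem.List.pyGetD w k []) then cs.1 + 1 else cs.1),
             (if pvRS i (PySem.List.pyGetD w j []) (PySem.List.pyGetD w k []) then cs.2 + 1 else cs.2))) cs) _
        (fun acc j _ => by
          apply PySem.List.foldl_congr_mem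
          intro acc' k _
          rw [if_pos hi]
          simp only [pvRA, pvRS, decide_eq_true_eq]
          by_cases h1 : PySem.List.pyGet? (PySem.List.pyGetD w j []) i
              = PySem.List.pyGet? (PySem.List.pyGetD w k []) i
          · simp [h1]
          · by_cases h2 : PySem.List.pyGet? (PySem.List.pyGetD w j []) i
                = PySem.List.pyGet? (PySem.List.pyGetD w k []) (i - 1)
              ∧ PySem.List.pyGet? (PySem.List.pyGetD w j []) (i - 1)
                = PySem.List.pyGet? (PySem.List.pyGetD w k []) i
            · simp only [if_neg h1, if_pos h2, if_pos (And.intro h1 h2)]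
            · simp [h1, h2])]
  rw [PySem.List.foldl_congr_mem _ _
        (fun cs j => (w.drop (j + 1).toNat).foldl
          (fun cs q =>
            ((if pvRA i (PySem.List.pyGetD w j []) q then cs.1 + 1 else cs.1),
             (if pvRS i (PySem.List.pyGetD w j []) q then cs.2 + 1 else cs.2))) cs) _
        (fun acc j hj => by
          have h0j : (0 : Int) ≤ j := (PySem.List.mem_pyRange_one.mp hj).1
          exact PySem.List.foldl_pyRange_pyGetD' (a := j + 1) w []
            (fun cs q =>
              ((if pvRA i (PySem.List.pyGetD w j []) q then cs.1 + 1 else cs.1),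
               (if pvRS i (PySem.List.pyGetD w j []) q then cs.2 + 1 else cs.2))) acc (by omega))]
  exact pvPairLoopAux (pvRA i) (pvRS i) [] w cs




theorem pvRA_edge (i : Nat) (hi : 1 ≤ i) (p q : List (Int × Int))
    (hp : i < p.length) (hq : i < q.length) :
    pvRA (i : Int) p q = pvRc (pvEdge (i : Int) p) (pvEdge (i : Int) q) := by
  have h1 : (i : Int) - 1 = ((i - 1 : Nat) : Int) := by omega
  have hpi : PySem.List.pyGet? p (i : Int) = some (p[i]'hp) := by
    rw [PySem.List.pyGet?_natCast]; exact List.getElem?_eq_getElem hp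
  have hqi : PySem.List.pyGet? q (i : Int) = some (q[i]'hq) := by
    rw [PySem.List.pyGet?_natCast]; exact List.getElem?_eq_getElem hq
  simp only [pvRA, pvRc, pvEdge, hpi, hqi, Option.getD_some, Option.some.injEq]

theorem pvRS_edge (i : Nat) (hi : 1 ≤ i) (p q : List (Int × Int))
    (hp : i < p.length) (hq : i < q.length) :
    pvRS (i : Int) p q = pvRs (pvEdge (i : Int) p) (pvEdge (i : Int) q) := by
  have h1 : (i : Int) - 1 = ((i - 1 : Nat) : Int) := by omega
  have hpi : PySem.List.pyGet? p (i : Int) = some (p[i]'hp) := by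
    rw [PySem.List.pyGet?_natCast]; exact List.getElem?_eq_getElem hp
  have hqi : PySem.List.pyGet? q (i : Int) = some (q[i]'hq) := by
    rw [PySem.List.pyGet?_natCast]; exact List.getElem?_eq_getElem hq
  have hpi1 : PySem.List.pyGet? p ((i : Int) - 1) = some (p[i - 1]'(by omega)) := by
    rw [h1, PySem.List.pyGet?_natCast]; exact List.getElem?_eq_getElem (by omega)
  have hqi1 : PySem.List.pyGet? q ((i : Int) - 1) = some (q[i - 1]'(by omega)) := by
    rw [h1, PySem.List.pyGet?_natCast]; exact List.getElem?_eq_getElem (by omega)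
  simp only [pvRS, pvRs, pvEdge, hpi, hqi, hpi1, hqi1, Option.getD_some, Option.some.injEq,
    ne_eq, Prod.mk.injEq, decide_eq_decide]
  constructor
  · rintro ⟨hne, had, hbc⟩
    refine ⟨⟨had.symm, hbc.symm⟩, fun h => hne ?_⟩
    rw [← h, hbc]
  · rintro ⟨⟨hda, hcb⟩, hba⟩
    refine ⟨fun h => hba ?_, hda.symm, hcb.symm⟩
    rw [← hcb]
    exact h.symm

theorem pvPhase_nonpos (i : Int) (hi : ¬ i > 0) (w : List (List (Int × Int))) (cs : Int × Int) :
    pvPhase i w cs = cs := by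
  unfold pvPhase
  rw [PySem.List.foldl_congr_mem _ _ (fun cs _ => cs) _
        (fun acc j _ => by
          rw [PySem.List.foldl_congr_mem _ _ (fun cs _ => cs) _
                (fun a k _ => by rw [if_neg hi])]
          exact PySem.List.foldl_ignore _ _)]
  exact PySem.List.foldl_ignore _ _



theorem pvCnt_split (l : List (List (Int × Int))) (i : Nat) :
    pvCntGT l i + pvCntLE l i = l.length := by
  unfold pvCntGT pvCntLE
  induction l with
  | nil => rfl
  | cons p t ih =>
    simp only [List.countP_cons, List.length_cons]
    by_cases h : i < p.length
    · have h' : ¬ (p.length ≤ i) := by omega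
      simp [h, h']; omega
    · have h' : p.length ≤ i := by omega
      simp [h, h']; omega


theorem pvAct_natCast (l : List (List (Int × Int))) (i : Nat) :
    pvAct l (i : Int) = l.filter (fun p => decide (i < p.length)) := by
  unfold pvAct
  apply List.filter_congr
  intro p _
  simp only [decide_eq_decide]
  exact_mod_cast Iff.rfl

theorem pvSortedLen_eq (l : List (List (Int × Int))) :
    (PySem.List.sorted l (fun p => (p.length : Int)) true).map (fun p => (p.length : Int))
      = PySem.List.sorted (l.map (fun p => (p.length : Int))) (fun x => x) true := by
  apply PySem.List.eq_of_perm_of_pairwise_le_of_injective (key := fun x : Int => -x) neg_injective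
  · exact ((PySem.List.sorted_perm l _ true).map _).trans
      (PySem.List.sorted_perm (l.map (fun p => (p.length : Int))) _ true).symm
  · have := PySem.List.sorted_pairwise_rev l (fun p => (p.length : Int))
    refine List.pairwise_map.mpr ?_
    exact this.imp (fun h => neg_le_neg h)
  · have := PySem.List.sorted_pairwise_rev (l.map (fun p => (p.length : Int))) (fun x => x)
    exact this.imp (fun h => neg_le_neg h)

def pvW (l : List (List (Int × Int))) : List (List (Int × Int)) :=
  PySem.List.sorted l (fun p => (p.length : Int)) true

theorem pvCntLE_mono (l : List (List (Int × Int))) {i j : Nat} (h : i ≤ j) :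
    pvCntLE l i ≤ pvCntLE l j := by
  apply List.countP_mono_left
  intro x hx
  simp only [decide_eq_true_eq]
  omega

theorem pvStepA_pop (w : List (List (Int × Int))) (c s : Int) (j : Int)
    (h : j > ((((PySem.List.pyGet? w (-1)).getD []).length : Int) - 1)) (x rest)
    (hpop : PySem.List.pop? w = some (x, rest)) :
    pvStepA (w, c, s) (j, ((0 : Int), (0 : Int))) = (rest, pvPhase j rest (c, s)) := by
  simp only [pvStepA]
  rw [if_pos h, hpop]

theorem pvStepA_nopop (w : List (List (Int × Int))) (c s : Int) (j : Int)
    (h : ¬ j > ((((PySem.List.pyGet? w (-1)).getD []).length : Int) - 1)) :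
    pvStepA (w, c, s) (j, ((0 : Int), (0 : Int))) = (w, pvPhase j w (c, s)) := by
  simp only [pvStepA]
  rw [if_neg h]

theorem pvAloop (l : List (List (Int × Int))) (lam : Int) (hpre : Pre_evaluierung l lam) :
    ∀ (i : Nat), i ≤ ((PySem.List.pyGet? (pvW l) 1).getD []).length →
    (PySem.List.pyRange 0 (i : Int)).foldl
        (fun st j => pvStepA st (j, ((0 : Int), (0 : Int)))) (pvW l, 0, 0)
      = ((pvW l).take (l.length - pvPop l i),
         ((PySem.List.pyRange 1 (i : Int)).map (fun j => pvCC l j)).sum,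
         ((PySem.List.pyRange 1 (i : Int)).map (fun j => pvSS l j)).sum) := by
  have hn : 2 ≤ l.length := hpre.1
  have hperm : (pvW l).Perm l := PySem.List.sorted_perm l _ true
  have hlen : (pvW l).length = l.length := PySem.List.length_sorted l _ true
  have hdesc : (pvW l).Pairwise (fun a b => b.length ≤ a.length) := by
    have := PySem.List.sorted_pairwise_rev l (fun p => (p.length : Int))
    exact this.imp (fun h => by exact_mod_cast h)
  have hcntW : ∀ (t : Nat), (pvW l).countP (fun p => decide (t < p.length)) = pvCntGT l t :=
    fun t => hperm.countP_eq _
  have h1W : 1 < (pvW l).length := by omega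
  have hsecond : (PySem.List.pyGet? (pvW l) 1).getD [] = (pvW l)[1]'h1W := by
    rw [show (1 : Int) = ((1 : Nat) : Int) by simp, PySem.List.pyGet?_natCast,
      List.getElem?_eq_getElem h1W]
    rfl
  have hLlt : ∀ (t : Nat), t < ((pvW l)[1]'h1W).length ↔ 2 ≤ pvCntGT l t := by
    intro t
    have hd := pvDesc_count hdesc 1 h1W t
    rw [hcntW] at hd
    exact hd
  have hLmax : ((pvW l)[1]'h1W).length ≤ pvMaxLen l := by
    have hmem : (pvW l)[1]'h1W ∈ l := hperm.mem_iff.mp (List.getElem_mem h1W)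
    exact (PySem.List.le_foldl_max_nat l (fun p => p.length) 0).2 _ hmem
  intro i
  induction i with
  | zero =>
    intro _
    rw [PySem.List.pyRange_one_eq_nil (by omega), PySem.List.pyRange_one_eq_nil (by omega)]
    have hp0 : pvPop l 0 = 0 := rfl
    rw [hp0, Nat.sub_zero, ← hlen, List.take_length]
    rfl
  | succ i ih =>
    intro hle
    have hle' : i ≤ ((PySem.List.pyGet? (pvW l) 1).getD []).length := by omega
    have hiL : i < ((pvW l)[1]'h1W).length := by
      rw [hsecond] at hle; omega
    have hcnt2 : 2 ≤ pvCntGT l i := (hLlt i).mp hiL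
    have hsplit := pvCnt_split l i
    have hclei : pvCntLE l i ≤ l.length - 2 := by
      unfold pvCntGT pvCntLE at *
      omega
    have hpople : pvPop l i ≤ l.length - 2 := by
      cases i with
      | zero => have : pvPop l 0 = 0 := rfl; omega
      | succ j =>
        have h1 := pvPop_le_cle l j
        have h2 : pvCntLE l j ≤ pvCntLE l (j + 1) := pvCntLE_mono l (by omega)
        omega
    have hmn : l.length - pvPop l i ≤ l.length := by omega
    have hm2 : 2 ≤ l.length - pvPop l i := by omega
    have hmlt : l.length - pvPop l i - 1 < (pvW l).length := by omega
    have hpeel : PySem.List.pyRange 0 ((i + 1 : Nat) : Int)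
        = PySem.List.pyRange 0 (i : Int) ++ [(i : Int)] := by
      rw [show ((i + 1 : Nat) : Int) = (i : Int) + 1 by push_cast; ring]
      exact PySem.List.pyRange_one_succ_right (by positivity)
    rw [hpeel, List.foldl_append, ih hle', List.foldl_cons, List.foldl_nil]
    have htake_decomp : (pvW l).take (l.length - pvPop l i)
        = (pvW l).take (l.length - pvPop l i - 1) ++ [(pvW l)[l.length - pvPop l i - 1]'hmlt] := by
      have h0 := List.take_add_one (l := pvW l) (i := l.length - pvPop l i - 1)
      rw [show l.length - pvPop l i - 1 + 1 = l.length - pvPop l i from by omega] at h0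
      rw [h0, List.getElem?_eq_getElem hmlt]
      rfl
    have hlast : (PySem.List.pyGet? ((pvW l).take (l.length - pvPop l i)) (-1)).getD []
        = (pvW l)[l.length - pvPop l i - 1]'hmlt := by
      rw [PySem.List.pyGet?_neg_one, htake_decomp, List.getLast?_concat]
      rfl
    have hpopeval : PySem.List.pop? ((pvW l).take (l.length - pvPop l i))
        = some ((pvW l)[l.length - pvPop l i - 1]'hmlt, (pvW l).take (l.length - pvPop l i - 1)) := by
      rw [htake_decomp]
      exact PySem.List.pop?_last _ _
    have hdc := pvDesc_count hdesc (l.length - pvPop l i - 1) hmlt i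
    rw [hcntW] at hdc
    have hcondiff : ((i : Int) > ((((pvW l)[l.length - pvPop l i - 1]'hmlt).length : Int) - 1))
        ↔ pvPop l i < pvCntLE l i := by
      have hcast : ((i : Int) > ((((pvW l)[l.length - pvPop l i - 1]'hmlt).length : Int) - 1))
          ↔ (((pvW l)[l.length - pvPop l i - 1]'hmlt).length ≤ i) := by omega
      rw [hcast]
      by_cases hlt : i < ((pvW l)[l.length - pvPop l i - 1]'hmlt).length
      · have h2 := hdc.mp hlt
        constructor
        · intro h; omega
        · intro h; omega
      · have h2 : ¬ (l.length - pvPop l i - 1 + 1 ≤ pvCntGT l i) := fun hc => hlt (hdc.mpr hc)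
        constructor
        · intro h; omega
        · intro h; omega
    have hstep : pvPop l (i + 1) = if pvPop l i < pvCntLE l i then pvPop l i + 1 else pvPop l i := rfl
    -- the value of the new work list
    by_cases hpop : pvPop l i < pvCntLE l i
    · -- A pops the shortest path
      have hpop1 : pvPop l (i + 1) = pvPop l i + 1 := by rw [hstep, if_pos hpop]
      have hw' : (pvW l).take (l.length - pvPop l i - 1) = (pvW l).take (l.length - pvPop l (i + 1)) := by
        rw [hpop1, show l.length - (pvPop l i + 1) = l.length - pvPop l i - 1 from by omega]
      rw [pvStepA_pop _ _ _ _ (by rw [hlast]; exact hcondiff.mpr hpop) _ _ hpopeval, hw']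
      rcases Nat.eq_zero_or_pos i with rfl | hi1
      · -- i = 0: no counting
        rw [pvPhase_nonpos (((0 : Nat)) : Int) (by omega)]
        rfl
      · -- i ≥ 1: count over the active paths
        rw [pvPhase_eq (i : Int) (by exact_mod_cast hi1)]
        have hsafe : pvPop l (i + 1) = pvCntLE l i :=
          pvPop_safety l lam hpre i hi1 (by omega) hcnt2
        have hfilter : (pvW l).take (l.length - pvPop l (i + 1))
            = (pvW l).filter (fun p => decide (i < p.length)) := by
          rw [pvDesc_filter_eq_take hdesc i, hcntW, hsafe]
          congr 1
          omega
        have hmem : ∀ p ∈ (pvW l).take (l.length - pvPop l (i + 1)), i < p.length := by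
          intro p hp
          rw [hfilter] at hp
          have := List.of_mem_filter hp
          simpa using this
        have hCC : pvPairs (pvRA (i : Int)) ((pvW l).take (l.length - pvPop l (i + 1))) = pvCC l (i : Int) := by
          rw [pvPairs_congr (S := fun p q => pvRc (pvEdge (i : Int) p) (pvEdge (i : Int) q))
                (fun x hx y hy => pvRA_edge i hi1 x y (hmem x hx) (hmem y hy)),
              pvPairs_map]
          unfold pvCC
          rw [pvAct_natCast]
          exact pvPairs_perm pvRc pvRc_symm ((hfilter ▸ (hperm.filter _)).map _)
        have hSS : pvPairs (pvRS (i : Int)) ((pvW l).take (l.length - pvPop l (i + 1))) = pvSS l (i : Int) := by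
          rw [pvPairs_congr (S := fun p q => pvRs (pvEdge (i : Int) p) (pvEdge (i : Int) q))
                (fun x hx y hy => pvRS_edge i hi1 x y (hmem x hx) (hmem y hy)),
              pvPairs_map]
          unfold pvSS
          rw [pvAct_natCast]
          exact pvPairs_perm pvRs pvRs_symm ((hfilter ▸ (hperm.filter _)).map _)
        rw [hCC, hSS]
        have hpeel2 : PySem.List.pyRange 1 ((i + 1 : Nat) : Int)
            = PySem.List.pyRange 1 (i : Int) ++ [(i : Int)] := by
          rw [show ((i + 1 : Nat) : Int) = (i : Int) + 1 by push_cast; ring]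
          exact PySem.List.pyRange_one_succ_right (by exact_mod_cast hi1)
        rw [hpeel2, List.map_append, List.map_append, List.sum_append, List.sum_append]
        simp
    · -- no pop this timestep
      have hpop1 : pvPop l (i + 1) = pvPop l i := by rw [hstep, if_neg hpop]
      rw [pvStepA_nopop _ _ _ _ (by rw [hlast]; exact fun hc => hpop (hcondiff.mp hc))]
      rw [show (pvW l).take (l.length - pvPop l i) = (pvW l).take (l.length - pvPop l (i + 1)) by rw [hpop1]]
      rcases Nat.eq_zero_or_pos i with rfl | hi1
      · rw [pvPhase_nonpos (((0 : Nat)) : Int) (by omega)]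
        rfl
      · rw [pvPhase_eq (i : Int) (by exact_mod_cast hi1)]
        have hsafe : pvPop l (i + 1) = pvCntLE l i :=
          pvPop_safety l lam hpre i hi1 (by omega) hcnt2
        have hfilter : (pvW l).take (l.length - pvPop l (i + 1))
            = (pvW l).filter (fun p => decide (i < p.length)) := by
          rw [pvDesc_filter_eq_take hdesc i, hcntW, hsafe]
          congr 1
          omega
        have hmem : ∀ p ∈ (pvW l).take (l.length - pvPop l (i + 1)), i < p.length := by
          intro p hp
          rw [hfilter] at hp
          have := List.of_mem_filter hp
          simpa using this
        have hCC : pvPairs (pvRA (i : Int)) ((pvW l).take (l.length - pvPop l (i + 1))) = pvCC l (i : Int) := by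
          rw [pvPairs_congr (S := fun p q => pvRc (pvEdge (i : Int) p) (pvEdge (i : Int) q))
                (fun x hx y hy => pvRA_edge i hi1 x y (hmem x hx) (hmem y hy)),
              pvPairs_map]
          unfold pvCC
          rw [pvAct_natCast]
          exact pvPairs_perm pvRc pvRc_symm ((hfilter ▸ (hperm.filter _)).map _)
        have hSS : pvPairs (pvRS (i : Int)) ((pvW l).take (l.length - pvPop l (i + 1))) = pvSS l (i : Int) := by
          rw [pvPairs_congr (S := fun p q => pvRs (pvEdge (i : Int) p) (pvEdge (i : Int) q))
                (fun x hx y hy => pvRS_edge i hi1 x y (hmem x hx) (hmem y hy)),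
              pvPairs_map]
          unfold pvSS
          rw [pvAct_natCast]
          exact pvPairs_perm pvRs pvRs_symm ((hfilter ▸ (hperm.filter _)).map _)
        rw [hCC, hSS]
        have hpeel2 : PySem.List.pyRange 1 ((i + 1 : Nat) : Int)
            = PySem.List.pyRange 1 (i : Int) ++ [(i : Int)] := by
          rw [show ((i + 1 : Nat) : Int) = (i : Int) + 1 by push_cast; ring]
          exact PySem.List.pyRange_one_succ_right (by exact_mod_cast hi1)
        rw [hpeel2, List.map_append, List.map_append, List.sum_append, List.sum_append]
        simp

theorem pvA_eq (l : List (List (Int × Int))) (lam : Int) (hpre : Pre_evaluierung l lam) :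
    evaluierung l lam
      = l.foldl (fun acc value => acc + (value.length : Int)) 0
        + 100 * ((((PySem.List.pyRange 1
              ((((PySem.List.pyGet? (pvW l) 1).getD []).length : Nat) : Int)).map
                (fun j => pvCC l j)).sum)
          + (((PySem.List.pyRange 1
              ((((PySem.List.pyGet? (pvW l) 1).getD []).length : Nat) : Int)).map
                (fun j => pvSS l j)).sum)) := by
  unfold evaluierung
  dsimp only
  rw [show PySem.List.sorted l (fun p => (p.length : Int)) true = pvW l from rfl]
  have h1 : (PySem.List.enumerate ((PySem.List.pyGet? (pvW l) 1).getD [])).foldl pvStepA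
        ((pvW l), 0, 0)
      = (PySem.List.enumerate ((PySem.List.pyGet? (pvW l) 1).getD [])).foldl
          (fun st iv => pvStepA st (iv.1, ((0 : Int), (0 : Int)))) ((pvW l), 0, 0) :=
    PySem.List.foldl_congr_mem _ _ _ _ (fun st iv _ => rfl)
  have h2 : (PySem.List.enumerate ((PySem.List.pyGet? (pvW l) 1).getD [])).foldl
        (fun st iv => pvStepA st (iv.1, ((0 : Int), (0 : Int)))) ((pvW l), 0, 0)
      = (((PySem.List.enumerate ((PySem.List.pyGet? (pvW l) 1).getD [])).map
            (fun x => x.1)).foldl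
          (fun st j => pvStepA st (j, ((0 : Int), (0 : Int)))) ((pvW l), 0, 0)) := by
    exact (List.foldl_map (f := fun x : Int × (Int × Int) => x.1)
      (g := fun st j => pvStepA st (j, ((0 : Int), (0 : Int))))).symm
  have h3 := PySem.List.map_fst_enumerate ((PySem.List.pyGet? (pvW l) 1).getD []) 0
  have hloop := pvAloop l lam hpre (((PySem.List.pyGet? (pvW l) 1).getD []).length) (le_refl _)
  rw [h1, h2, h3, zero_add, hloop]

-- ===== VERDICT (by name: the statement is the Claim_ definition above) =====
theorem evaluierung_spec : Claim_equal_evaluierung := by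
  intro l lam hdom hpre
  unfold Spec_evaluierung
  rw [pvA_eq l lam hpre, pvB_eq l lam]
  have hn : 2 ≤ l.length := hpre.1
  have hlen : (pvW l).length = l.length := PySem.List.length_sorted l _ true
  have h1W : 1 < (pvW l).length := by omega
  have hsecond : (PySem.List.pyGet? (pvW l) 1).getD [] = (pvW l)[1]'h1W := by
    rw [show (1 : Int) = ((1 : Nat) : Int) by simp, PySem.List.pyGet?_natCast,
      List.getElem?_eq_getElem h1W]
    rfl
  have hYget : PySem.List.pyGet?
        (PySem.List.sorted (l.map (fun p => (p.length : Int))) (fun x => x) true) 1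
      = some ((((pvW l)[1]'h1W).length : Nat) : Int) := by
    rw [← pvSortedLen_eq l,
      show PySem.List.sorted l (fun p => (p.length : Int)) true = pvW l from rfl,
      show (1 : Int) = ((1 : Nat) : Int) by simp,
      PySem.List.pyGet?_natCast, List.getElem?_map, List.getElem?_eq_getElem h1W]
    rfl
  rw [hYget, hsecond, Option.getD_some]
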